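-- pv_equiv track=rewrite | github.com/oldgiova/mender-python-client | src/mender/client/deployments.py | get_exponential_backoff_time
-- ===== SOURCE A (Python) =====
-- DOWNLOAD_RESUME_MIN_INTERVAL_SECONDS = 60
--
-- class DeploymentDownloadFailed(Exception):
--     pass
--
-- def get_exponential_backoff_time(tried: int, max_interval: int) -> int:
--     per_internal_attempts = 3
--     smallest_unit = DOWNLOAD_RESUME_MIN_INTERVAL_SECONDS
--
--     interval = smallest_unit
--     next_interval = interval
--     for count in range(0, tried + 1, per_internal_attempts):
--         interval = next_interval
--         next_interval *= 2
--         if interval >= max_interval: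
--             if tried - count >= per_internal_attempts:
--                 raise DeploymentDownloadFailed(
--                     f"Max tries exceeded: tries {tried} max_interval {max_interval}"
--                 )
--             if max_interval < smallest_unit:
--                 return smallest_unit
--             return max_interval
--
--     return interval
-- ===== SOURCE B (Python) =====
-- DOWNLOAD_RESUME_MIN_INTERVAL_SECONDS = 60
--
--
-- class DeploymentDownloadFailed(Exception):
--     pass
--
--
-- def get_exponential_backoff_time(tried: int, max_interval: int) -> int:
--     # Closed form: j is the smallest integer >= 0 with 60 * 2**j >= max_interval,
--     # computed exactly with integer ceiling division and bit_length (no loop).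
--     if tried < 0:
--         return 60
--     m = -((-max_interval) // 60)  # ceil(max_interval / 60)
--     j = (m - 1).bit_length() if m > 1 else 0
--     if 3 * j <= tried:
--         if tried - 3 * j >= 3:
--             raise DeploymentDownloadFailed(
--                 f"Max tries exceeded: tries {tried} max_interval {max_interval}"
--             )
--         return 60 if max_interval < 60 else max_interval
--     return 60 << (tried // 3)
-- ===== Notes on version B (the rewrite author's own statement) =====
-- stated objective: alternative
-- what changed: Replaces A's doubling loop over range(0, tried+1, 3) by a closed form: the trigger step j (smallest j with 60*2**j >= max_interval) is computed exactly via integer ceiling division and bit_length, then one branch decides raise/cap/last-interval.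
import Mathlib
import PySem

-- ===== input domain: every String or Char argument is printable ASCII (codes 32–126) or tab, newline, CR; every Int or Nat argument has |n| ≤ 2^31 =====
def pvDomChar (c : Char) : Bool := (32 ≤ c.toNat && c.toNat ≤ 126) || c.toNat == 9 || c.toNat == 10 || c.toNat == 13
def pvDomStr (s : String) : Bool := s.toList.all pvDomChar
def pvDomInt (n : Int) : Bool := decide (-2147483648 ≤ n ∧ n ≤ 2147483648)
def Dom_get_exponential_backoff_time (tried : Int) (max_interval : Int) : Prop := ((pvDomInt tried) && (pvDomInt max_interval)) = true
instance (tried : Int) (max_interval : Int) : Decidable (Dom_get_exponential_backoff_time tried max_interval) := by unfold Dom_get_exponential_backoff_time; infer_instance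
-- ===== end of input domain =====

-- B replaces A's doubling loop by a closed form: the trigger step is computed exactly
-- from bit_length and ceiling division (objective: alternative — O(tried) loop vs O(1) arithmetic).

-- ===== PORT A =====
-- the for-loop of A: state (interval, next_interval), early return on interval >= max_interval;
-- the raise DeploymentDownloadFailed branch is excluded by Pre_ (placeholder value 0)
def pvLoopA (tried max_interval : Int) : List Int → Int → Int → Int
  | [], interval, _ => interval
  | count :: rest, _, next_interval =>
    let interval := next_interval
    let next_interval := next_interval * 2
    if interval ≥ max_interval then
      if tried - count ≥ 3 then 0  -- raise DeploymentDownloadFailed (outside Pre_)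
      else if max_interval < 60 then 60 else max_interval
    else pvLoopA tried max_interval rest interval next_interval

def get_exponential_backoff_time (tried : Int) (max_interval : Int) : Int :=
  pvLoopA tried max_interval (PySem.List.pyRange 0 (tried + 1) 3) 60 60

-- ===== PORT B =====
def get_exponential_backoff_time_alt (tried : Int) (max_interval : Int) : Int :=
  if tried < 0 then 60
  else
    let m : Int := -(PySem.Int.floordiv (-max_interval) 60)   -- ceil(max_interval / 60)
    let j : Int := if m > 1 then ((PySem.Int.bitLength (m - 1) : Int)) else 0
    if 3 * j ≤ tried then
      if tried - 3 * j ≥ 3 then 0  -- raise DeploymentDownloadFailed (outside Pre_)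
      else if max_interval < 60 then 60 else max_interval
    else (60 : Int) <<< (PySem.Int.floordiv tried 3).toNat

-- ===== PRECONDITION & SPEC =====
-- Pre_ excludes exactly the inputs where Python A raises DeploymentDownloadFailed:
-- tried >= 3 and the interval reached at count 3*(tried//3 - 1) already meets max_interval.
def Pre_get_exponential_backoff_time (tried : Int) (max_interval : Int) : Prop :=
  tried < 3 ∨ 60 * 2 ^ (PySem.Int.floordiv tried 3 - 1).toNat < max_interval
instance (tried : Int) (max_interval : Int) : Decidable (Pre_get_exponential_backoff_time tried max_interval) := by unfold Pre_get_exponential_backoff_time; infer_instance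

def pvWitness_get_exponential_backoff_time : Int × Int := (4, 1000)

def Spec_get_exponential_backoff_time (tried : Int) (max_interval : Int) (out : Int) : Prop := out = get_exponential_backoff_time_alt tried max_interval
instance (tried : Int) (max_interval : Int) (out : Int) : Decidable (Spec_get_exponential_backoff_time tried max_interval out) := by unfold Spec_get_exponential_backoff_time; infer_instance

-- ===== CLAIM (what is proved, stated in full; the proofs are below) =====
def Claim_equal_get_exponential_backoff_time : Prop := ∀ (tried : Int) (max_interval : Int), Dom_get_exponential_backoff_time tried max_interval → Pre_get_exponential_backoff_time tried max_interval → Spec_get_exponential_backoff_time tried max_interval (get_exponential_backoff_time tried max_interval)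

-- ===== LEMMAS AND PROOFS =====

-- If no count in the remaining list triggers, the loop returns the last doubled interval.
theorem pvLoopA_no_trigger (t mi : Int) : ∀ (n i : Nat) (x : Int),
    (∀ k, k < n → 60 * 2 ^ (i + k) < mi) →
    pvLoopA t mi ((List.range' i n).map (fun k : Nat => ((3 * k : Nat) : Int))) x (60 * 2 ^ i)
      = if n = 0 then x else 60 * 2 ^ (i + n - 1) := by
  intro n
  induction n with
  | zero => intro i x _; simp [pvLoopA]
  | succ n ih =>
    intro i x h
    have h0 : 60 * 2 ^ (i + 0) < mi := h 0 (Nat.succ_pos n)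
    rw [Nat.add_zero] at h0
    simp only [List.range'_succ, List.map_cons, pvLoopA]
    rw [if_neg (by omega)]
    have harg : (60 : Int) * 2 ^ i * 2 = 60 * 2 ^ (i + 1) := by ring
    rw [harg]
    have hrec := ih (i + 1) (60 * 2 ^ i) (by
      intro k hk
      have hh := h (k + 1) (by omega)
      have he : i + 1 + k = i + (k + 1) := by omega
      rw [he]; exact hh)
    rw [hrec]
    rcases Nat.eq_zero_or_pos n with hn | hn
    · subst hn; simp
    · rw [if_neg (by omega), if_neg (by omega)]
      have he : i + 1 + n - 1 = i + (n + 1) - 1 := by omega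
      rw [he]

-- smallest-power characterization: with m = ceil(mi/60) and jN = B's bit-length value,
-- mi ≤ 60*2^k holds exactly for k ≥ jN
theorem pvTriggerIff (mi m : Int) (hm1 : (m - 1) * 60 < mi) (hm2 : mi ≤ m * 60)
    (jN : Nat) (hj : jN = if m > 1 then PySem.Int.bitLength (m - 1) else 0) (k : Nat) :
    mi ≤ 60 * 2 ^ k ↔ jN ≤ k := by
  by_cases h1 : m > 1
  · rw [if_pos h1] at hj
    have habs : ((m - 1).natAbs : Int) = m - 1 := by omega
    constructor
    · intro hle
      by_contra hlt
      push Not at hlt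
      have h2 : 2 ^ k ≤ 2 ^ (jN - 1) := Nat.pow_le_pow_right (by norm_num) (by omega)
      have h3 : 2 ^ (jN - 1) ≤ (m - 1).natAbs := by
        rw [hj]; exact PySem.Int.two_pow_bitLength_le _ (by omega)
      have h4 : ((2 : Int)) ^ k ≤ m - 1 := by
        calc ((2 : Int)) ^ k = ((2 ^ k : Nat) : Int) := by push_cast; ring
          _ ≤ (((m - 1).natAbs : Nat) : Int) := by exact_mod_cast le_trans h2 h3
          _ = m - 1 := habs
      nlinarith
    · intro hge
      have h2 : (m - 1).natAbs < 2 ^ jN := by rw [hj]; exact PySem.Int.lt_two_pow_bitLength _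
      have h2' : m - 1 < (2 : Int) ^ jN := by
        calc m - 1 = ((m - 1).natAbs : Int) := habs.symm
          _ < ((2 ^ jN : Nat) : Int) := by exact_mod_cast h2
          _ = (2 : Int) ^ jN := by push_cast; ring
      have hmono : ((2 : Int)) ^ jN ≤ (2 : Int) ^ k := by
        have hh := Nat.pow_le_pow_right (show 1 ≤ 2 by norm_num) hge
        calc ((2 : Int)) ^ jN = ((2 ^ jN : Nat) : Int) := by push_cast; ring
          _ ≤ ((2 ^ k : Nat) : Int) := by exact_mod_cast hh
          _ = (2 : Int) ^ k := by push_cast; ring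
      nlinarith
  · rw [if_neg h1] at hj
    have hmle : m ≤ 1 := by omega
    have hp : (1 : Int) ≤ 2 ^ k := one_le_pow₀ (by norm_num)
    constructor
    · intro _; omega
    · intro _; nlinarith

-- If count 3*(i+k) is the first trigger, the loop returns A's branch value.
theorem pvLoopA_trigger (t mi : Int) : ∀ (k n i : Nat) (x : Int),
    k < n →
    (∀ l, l < k → 60 * 2 ^ (i + l) < mi) →
    60 * 2 ^ (i + k) ≥ mi →
    pvLoopA t mi ((List.range' i n).map (fun k : Nat => ((3 * k : Nat) : Int))) x (60 * 2 ^ i)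
      = if t - ((3 * (i + k) : Nat) : Int) ≥ 3 then 0 else if mi < 60 then 60 else mi := by
  intro k
  induction k with
  | zero =>
    intro n i x hk _ htr
    obtain ⟨n', rfl⟩ : ∃ n', n = n' + 1 := ⟨n - 1, by omega⟩
    simp only [List.range'_succ, List.map_cons, pvLoopA]
    rw [if_pos (by omega)]
    norm_num
  | succ k ih =>
    intro n i x hk hmin htr
    obtain ⟨n', rfl⟩ : ∃ n', n = n' + 1 := ⟨n - 1, by omega⟩
    have h0 : 60 * 2 ^ (i + 0) < mi := hmin 0 (Nat.succ_pos k)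
    rw [Nat.add_zero] at h0
    simp only [List.range'_succ, List.map_cons, pvLoopA]
    rw [if_neg (by omega)]
    have harg : (60 : Int) * 2 ^ i * 2 = 60 * 2 ^ (i + 1) := by ring
    rw [harg]
    have hrec := ih n' (i + 1) (60 * 2 ^ i) (by omega) (by
      intro l hl
      have hh := hmin (l + 1) (by omega)
      have he : i + 1 + l = i + (l + 1) := by omega
      rw [he]; exact hh) (by
      have he : i + 1 + k = i + (k + 1) := by omega
      rw [he]; exact htr)
    rw [hrec]
    have he : i + 1 + k = i + (k + 1) := by omega
    rw [he]

-- the two ports agree on every input (the raise region maps to the same placeholder)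
theorem pvMainEq (t mi : Int) :
    get_exponential_backoff_time t mi = get_exponential_backoff_time_alt t mi := by
  by_cases ht : t < 0
  · -- empty loop: range(0, t+1, 3) is empty
    have hempty : PySem.List.pyRange 0 (t + 1) 3 = [] := by
      rw [PySem.List.pyRange_of_pos 0 (t + 1) (by norm_num), if_neg (by omega)]
      simp
    simp [get_exponential_backoff_time, get_exponential_backoff_time_alt, hempty, pvLoopA, ht]
  · push Not at ht
    set m : Int := -(PySem.Int.floordiv (-mi) 60) with hmdef
    obtain ⟨hm1, hm2⟩ := (PySem.Int.neg_floordiv_neg_eq_iff_of_pos (a := mi) (b := 60) (q := m)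
      (by norm_num)).mp rfl
    set jN : Nat := if m > 1 then PySem.Int.bitLength (m - 1) else 0 with hjdef
    have htr := pvTriggerIff mi m hm1 hm2 jN hjdef
    have hfd : PySem.Int.floordiv t 3 = t / 3 := PySem.Int.floordiv_eq_ediv_of_pos (by norm_num)
    set N : Nat := (t / 3).toNat with hNdef
    have hNt : 3 * (N : Int) ≤ t ∧ t < 3 * (N : Int) + 3 := by
      constructor <;> omega
    -- the loop's count list
    have hcounts : PySem.List.pyRange 0 (t + 1) 3
        = (List.range' 0 (N + 1)).map (fun k : Nat => ((3 * k : Nat) : Int)) := by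
      rw [PySem.List.pyRange_of_pos 0 (t + 1) (by norm_num), if_pos (by omega)]
      have hM : ((t + 1 - 0 + 3 - 1) / 3).toNat = N + 1 := by omega
      rw [hM, ← List.range_eq_range']
      exact List.map_congr_left (by intro a _; push_cast; ring)
    -- B with its lets resolved
    have hB : get_exponential_backoff_time_alt t mi
        = if 3 * (jN : Int) ≤ t then
            (if t - 3 * (jN : Int) ≥ 3 then 0 else if mi < 60 then 60 else mi)
          else (60 : Int) <<< (PySem.Int.floordiv t 3).toNat := by
      show (if t < 0 then (60 : Int) else _) = _
      rw [if_neg (by omega)]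
      by_cases h1 : m > 1
      · simp only [← hmdef, hjdef, if_pos h1]
      · simp only [← hmdef, hjdef, if_neg h1]
        norm_num
    by_cases hcase : jN ≤ N
    · -- the loop triggers at count 3*jN
      have hA := pvLoopA_trigger t mi jN (N + 1) 0 60 (by omega)
        (by intro l hl
            rw [Nat.zero_add]
            have := (htr l).not.mpr (by omega)
            omega)
        (by rw [Nat.zero_add]; exact (htr jN).mpr (le_refl jN))
      rw [show (60 : Int) * 2 ^ (0 : Nat) = 60 from by norm_num] at hA
      rw [get_exponential_backoff_time, hcounts, hA, hB]
      have hc : t - ((3 * (0 + jN) : Nat) : Int) = t - 3 * (jN : Int) := by push_cast; ring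
      rw [hc, if_pos (show (3 : Int) * (jN : Int) ≤ t by omega)]
    · -- no trigger: the loop runs to the end
      have hA := pvLoopA_no_trigger t mi (N + 1) 0 60
        (by intro k hk
            rw [Nat.zero_add]
            have := (htr k).not.mpr (by omega)
            omega)
      rw [if_neg (by omega)] at hA
      rw [show (0 + (N + 1) - 1 : Nat) = N from by omega] at hA
      rw [show (60 : Int) * 2 ^ (0 : Nat) = 60 from by norm_num] at hA
      rw [get_exponential_backoff_time, hcounts, hA, hB, if_neg (by omega)]
      rw [hfd, Int.shiftLeft_eq]

-- ===== VERDICT (by name: the statement is the Claim_ definition above) =====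
theorem get_exponential_backoff_time_spec : Claim_equal_get_exponential_backoff_time := by
  intro tried max_interval _ _
  unfold Spec_get_exponential_backoff_time
  exact pvMainEq tried max_interval
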